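-- pv_equiv track=rewrite | github.com/solaegis/CharacterMarkdown | scripts/trim.py | trim_mermaid_blocks
-- ===== SOURCE A (Python) =====
-- def trim_mermaid_blocks(content: str) -> str:
--     """
--     Trim excessive blank lines inside mermaid code blocks.
--
--     Mermaid blocks can have padding newlines from chunking that should be reduced.
--     This function reduces 3+ consecutive blank lines to 2 inside mermaid blocks only.
--     """
--     lines = content.splitlines()
--     result = []
--
--     in_mermaid = False
--     consecutive_blanks = 0
--
--     for line in lines:
--         stripped = line.strip()
--
--         # Check for mermaid block start
--         if stripped.startswith('```mermaid'):
--             in_mermaid = True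
--             consecutive_blanks = 0
--             result.append(line)
--             continue
--
--         # Check for code block end (while in mermaid)
--         if in_mermaid and stripped == '```':
--             in_mermaid = False
--             # Remove trailing blanks before closing fence
--             while result and result[-1].strip() == '':
--                 result.pop()
--             result.append(line)
--             consecutive_blanks = 0
--             continue
--
--         # Inside mermaid block: limit consecutive blanks
--         if in_mermaid:
--             if stripped == '':
--                 consecutive_blanks += 1
--                 # Allow max 2 consecutive blank lines
--                 if consecutive_blanks <= 2:
--                     result.append(line)
--             else:
--                 consecutive_blanks = 0
--                 result.append(line)
--         else:
--             # Outside mermaid: pass through unchanged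
--             result.append(line)
--
--     return '\n'.join(result)
-- ===== SOURCE B (Python) =====
-- def trim_mermaid_blocks(content: str) -> str:
--     """
--     Trim excessive blank lines inside mermaid code blocks.
--
--     Segment-based rewrite: partition the lines into plain runs and mermaid
--     blocks; inside a block, collapse each maximal run of blank lines to its
--     first two lines, and for a closed block drop trailing blank lines
--     before the closing fence.
--     """
--     lines = content.splitlines()
--     n = len(lines)
--     out = []
--     i = 0
--     while i < n:
--         line = lines[i]
--         if not line.strip().startswith('```mermaid'):
--             out.append(line)
--             i += 1
--             continue
--         # Mermaid block: opening fence, then interior up to the closing fence.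
--         out.append(line)
--         j = i + 1
--         while j < n and lines[j].strip() != '```':
--             j += 1
--         interior = lines[i + 1:j]
--         # Collapse each maximal run of blank lines to its first two lines.
--         kept = []
--         p = 0
--         m = len(interior)
--         while p < m:
--             if interior[p].strip() == '':
--                 q = p
--                 while q < m and interior[q].strip() == '':
--                     q += 1
--                 kept.extend(interior[p:min(p + 2, q)])
--                 p = q
--             else:
--                 kept.append(interior[p])
--                 p += 1
--         if j < n:
--             # Closed block: trailing blank lines before the fence go away.
--             k = len(kept)
--             while k > 0 and kept[k - 1].strip() == '':
--                 k -= 1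
--             kept = kept[:k]
--             kept.append(lines[j])
--         out.extend(kept)
--         i = j + 1
--     return '\n'.join(out)
-- ===== Notes on version B (the rewrite author's own statement) =====
-- stated objective: alternative
-- what changed: Replaces A's single-pass state machine (in_mermaid flag, consecutive-blank counter, pop-loop on the shared result list) by a segment decomposition: plain lines pass through, each mermaid block is located as a whole and its interior processed run-by-run (each maximal blank run collapsed to its first two lines, trailing blanks dropped for closed blocks).
import Mathlib
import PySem

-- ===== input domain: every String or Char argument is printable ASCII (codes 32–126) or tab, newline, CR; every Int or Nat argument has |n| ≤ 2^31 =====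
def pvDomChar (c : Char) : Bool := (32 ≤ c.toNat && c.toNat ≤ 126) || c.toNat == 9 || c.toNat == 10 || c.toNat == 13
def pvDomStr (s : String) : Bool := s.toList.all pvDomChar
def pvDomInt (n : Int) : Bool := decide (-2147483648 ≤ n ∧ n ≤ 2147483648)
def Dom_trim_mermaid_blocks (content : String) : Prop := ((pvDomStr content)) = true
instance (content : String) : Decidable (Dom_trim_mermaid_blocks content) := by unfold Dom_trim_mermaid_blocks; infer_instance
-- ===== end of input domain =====

-- B replaces A's streaming state machine (in_mermaid flag + blank counter + pop-loop on the
-- whole result) by a segment decomposition: plain runs pass through, each mermaid block's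
-- interior is processed run-by-run; objective: alternative (same cost, different structure).

-- ===== PORT A =====
-- the 'while result and result[-1].strip() == "": result.pop()' loop
def popBlanks (r : List String) : List String :=
  match h : r.getLast? with
  | some x => if PySem.Str.strip x == "" then popBlanks r.dropLast else r
  | none => r
termination_by r.length
decreasing_by
  have hne : r ≠ [] := by intro e; subst e; simp at h
  have : 0 < r.length := List.length_pos_iff.mpr hne
  simp [List.length_dropLast]; omega

-- the body of A's for-loop; state = (in_mermaid, consecutive_blanks, result)
def stepA (st : Bool × Nat × List String) (line : String) : Bool × Nat × List String :=
  let stripped := PySem.Str.strip line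
  if PySem.Str.startswith stripped "```mermaid" then
    (true, 0, st.2.2 ++ [line])
  else if st.1 && (stripped == "```") then
    (false, 0, popBlanks st.2.2 ++ [line])
  else if st.1 then
    if stripped == "" then
      (true, st.2.1 + 1, if st.2.1 + 1 ≤ 2 then st.2.2 ++ [line] else st.2.2)
    else
      (true, 0, st.2.2 ++ [line])
  else
    (st.1, st.2.1, st.2.2 ++ [line])

def trim_mermaid_blocks (content : String) : String :=
  PySem.Str.join "\n" ((PySem.Str.splitlines content).foldl stepA (false, 0, [])).2.2

-- ===== PORT B =====
-- Source B's k-countdown + slice: drop the trailing blank lines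
def dropTrailBlanks (xs : List String) : List String :=
  (xs.reverse.dropWhile (fun l => PySem.Str.strip l == "")).reverse

-- Source B's inner p/q loop: collapse each maximal blank run to its first two lines
def collapseRuns : List String → List String
  | [] => []
  | l :: rest =>
    if PySem.Str.strip l == "" then
      ((l :: rest).takeWhile (fun x => PySem.Str.strip x == "")).take 2
        ++ collapseRuns ((l :: rest).dropWhile (fun x => PySem.Str.strip x == ""))
    else
      l :: collapseRuns rest
termination_by xs => xs.length
decreasing_by
  · simp_all
    exact List.length_dropWhile_le _ _
  · simp

-- Source B's outer while loop: emit plain lines, and at an opening fence process the block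
def goB : List String → List String
  | [] => []
  | l :: rest =>
    if PySem.Str.startswith (PySem.Str.strip l) "```mermaid" then
      let interior := rest.takeWhile (fun x => !(PySem.Str.strip x == "```"))
      let rest' := rest.dropWhile (fun x => !(PySem.Str.strip x == "```"))
      if hr : rest' = [] then
        l :: collapseRuns interior
      else
        l :: (dropTrailBlanks (collapseRuns interior) ++ rest'.head hr :: goB rest'.tail)
    else
      l :: goB rest
termination_by xs => xs.length
decreasing_by
  · have h1 : (rest.dropWhile (fun x => !(PySem.Str.strip x == "```"))).length ≤ rest.length :=
      List.length_dropWhile_le _ _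
    have h2 : 0 < (rest.dropWhile (fun x => !(PySem.Str.strip x == "```"))).length :=
      List.length_pos_iff.mpr hr
    simp only [List.length_tail, List.length_cons]
    omega
  · simp

def trim_mermaid_blocks_alt (content : String) : String :=
  PySem.Str.join "\n" (goB (PySem.Str.splitlines content))

-- ===== PRECONDITION & SPEC =====
def Spec_trim_mermaid_blocks (content : String) (out : String) : Prop := out = trim_mermaid_blocks_alt content
instance (content : String) (out : String) : Decidable (Spec_trim_mermaid_blocks content out) := by unfold Spec_trim_mermaid_blocks; infer_instance

-- ===== CLAIM (what is proved, stated in full; the proofs are below) =====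
def Claim_equal_trim_mermaid_blocks : Prop := ∀ (content : String), Dom_trim_mermaid_blocks content → Spec_trim_mermaid_blocks content (trim_mermaid_blocks content)

-- ===== LEMMAS AND PROOFS =====

-- A's interior bookkeeping (blank counter), extracted for the proof
def keepA (cb : Nat) : List String → List String
  | [] => []
  | l :: rest =>
    if PySem.Str.strip l == "" then
      (if cb + 1 ≤ 2 then [l] else []) ++ keepA (cb + 1) rest
    else
      l :: keepA 0 rest

lemma popBlanks_eq_dropTrail (xs : List String) : popBlanks xs = dropTrailBlanks xs := by
  induction xs using List.reverseRecOn with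
  | nil => simp [popBlanks, dropTrailBlanks]
  | append_singleton ys x ih =>
    rw [popBlanks]
    split
    · rename_i x1 hx1
      rw [List.getLast?_concat] at hx1
      injection hx1 with e
      subst e
      rw [List.dropLast_concat]
      by_cases hx : (PySem.Str.strip x == "") = true
      · have hx' : PySem.Str.strip x = "" := by simpa using hx
        simp [hx', ih, dropTrailBlanks]
      · have hx' : ¬ PySem.Str.strip x = "" := by simpa using hx
        simp [dropTrailBlanks, hx]
    · rename_i hx1
      rw [List.getLast?_concat] at hx1
      simp at hx1

lemma keepA_shift (ls : List String) : ∀ cb : Nat,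
    keepA cb ls = ((ls.takeWhile (fun x => PySem.Str.strip x == "")).take (2 - cb))
      ++ keepA 0 (ls.dropWhile (fun x => PySem.Str.strip x == "")) := by
  induction ls with
  | nil => intro cb; simp [keepA]
  | cons l rest ih =>
    intro cb
    by_cases hb : (PySem.Str.strip l == "") = true
    · rw [keepA]
      simp only [hb, if_true, ih (cb + 1)]
      by_cases hc : cb + 1 ≤ 2
      · have h2 : 2 - cb = (2 - (cb + 1)) + 1 := by omega
        simp [hc, h2, hb, List.take_succ_cons]
      · have h2 : 2 - cb = 0 := by omega
        have h3 : 2 - (cb + 1) = 0 := by omega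
        simp [hc, h2, h3, hb]
    · rw [keepA]
      simp [hb]
      rw [keepA]
      simp [hb]

lemma keepA_zero_eq_collapse : ∀ (n : Nat) (ls : List String), ls.length ≤ n →
    keepA 0 ls = collapseRuns ls := by
  intro n
  induction n with
  | zero =>
    intro ls h
    have : ls = [] := List.eq_nil_of_length_eq_zero (by omega)
    subst this; simp [keepA, collapseRuns]
  | succ n ih =>
    intro ls h
    match ls with
    | [] => simp [keepA, collapseRuns]
    | l :: rest =>
      simp only [List.length_cons] at h
      by_cases hb : (PySem.Str.strip l == "") = true
      · have hdw : List.dropWhile (fun x => PySem.Str.strip x == "") (l :: rest)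
            = List.dropWhile (fun x => PySem.Str.strip x == "") rest := by simp [hb]
        have hlen : (List.dropWhile (fun x => PySem.Str.strip x == "") rest).length ≤ n := by
          have := List.length_dropWhile_le (fun x => PySem.Str.strip x == "") rest
          omega
        rw [collapseRuns, keepA_shift]
        simp only [hb, if_true, Nat.sub_zero]
        congr 1
        rw [hdw, ih _ hlen]
      · rw [collapseRuns, keepA]
        rw [ih rest (by omega)]
        simp [hb]

lemma mermaid_facts {l : String}
    (h : PySem.Str.startswith (PySem.Str.strip l) "```mermaid" = true) :
    PySem.Str.strip l ≠ "" ∧ PySem.Str.strip l ≠ "```" := by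
  constructor
  · intro hb; rw [hb] at h; exact absurd h (by decide)
  · intro hf; rw [hf] at h; exact absurd h (by decide)

lemma takeWhile_of_dropWhile_nil {Q : String → Bool} {rest : List String}
    (hdw : List.dropWhile Q rest = []) : List.takeWhile Q rest = rest := by
  have h2 := List.takeWhile_append_dropWhile (p := Q) (l := rest)
  rw [hdw, List.append_nil] at h2
  exact h2

lemma dropTrail_cons_of_nonblank (res : List String) (l : String) (X : List String)
    (hl : PySem.Str.strip l ≠ "") :
    dropTrailBlanks (res ++ l :: X) = res ++ l :: dropTrailBlanks X := by
  have hl' : (PySem.Str.strip l == "") = false := by simp [hl]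
  simp only [dropTrailBlanks, List.reverse_append, List.reverse_cons, List.dropWhile_append]
  split
  · rename_i hemp
    simp only [List.isEmpty_iff] at hemp
    simp [hemp, hl']
  · rename_i hemp
    simp only [List.isEmpty_iff] at hemp
    simp

lemma mainLoop : ∀ (n : Nat) (ls : List String), ls.length ≤ n →
    (∀ (cb : Nat) (res : List String),
      (List.foldl stepA (false, cb, res) ls).2.2 = res ++ goB ls) ∧
    (∀ (cb : Nat) (res : List String),
      (List.foldl stepA (true, cb, res) ls).2.2 =
        match List.dropWhile (fun x => !(PySem.Str.strip x == "```")) ls with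
        | [] => res ++ keepA cb ls
        | f :: r =>
            popBlanks (res ++ keepA cb
                (List.takeWhile (fun x => !(PySem.Str.strip x == "```")) ls))
              ++ f :: goB r) := by
  intro n
  induction n with
  | zero =>
    intro ls h
    have : ls = [] := List.eq_nil_of_length_eq_zero (by omega)
    subst this
    exact ⟨fun cb res => by simp [goB], fun cb res => by simp [keepA]⟩
  | succ n ih =>
    intro ls h
    match ls with
    | [] => exact ⟨fun cb res => by simp [goB], fun cb res => by simp [keepA]⟩
    | l :: rest =>
      simp only [List.length_cons] at h
      have hrest := ih rest (by omega)
      have htwlen : (List.takeWhile (fun x => !(PySem.Str.strip x == "```")) rest).length ≤ rest.length :=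
        (List.takeWhile_prefix _).length_le
      have hkc := keepA_zero_eq_collapse rest.length
        (List.takeWhile (fun x => !(PySem.Str.strip x == "```")) rest) htwlen
      constructor
      · -- outside a mermaid block
        intro cb res
        rw [List.foldl_cons]
        by_cases hM : PySem.Str.startswith (PySem.Str.strip l) "```mermaid" = true
        · obtain ⟨hB, hF⟩ := mermaid_facts hM
          have hM2 := hM; simp at hM2
          have hstep : stepA (false, cb, res) l = (true, 0, res ++ [l]) := by
            simp [stepA, hM2]
          rw [hstep, hrest.2 0 (res ++ [l])]
          cases hdw : List.dropWhile (fun x => !(PySem.Str.strip x == "```")) rest with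
          | nil =>
            rw [takeWhile_of_dropWhile_nil hdw] at hkc
            simp [goB, hM2, hdw, hkc, takeWhile_of_dropWhile_nil hdw]
          | cons f r =>
            simp [goB, hM2, hdw, hkc, popBlanks_eq_dropTrail,
              dropTrail_cons_of_nonblank res l _ hB]
        · have hM2 : PySem.Str.startswith (PySem.Str.strip l) "```mermaid" = false :=
            eq_false_of_ne_true hM
          simp at hM2
          have hstep : stepA (false, cb, res) l = (false, cb, res ++ [l]) := by
            simp [stepA, hM2]
          rw [hstep, hrest.1 cb (res ++ [l])]
          simp [goB, hM2]
      · -- inside a mermaid block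
        intro cb res
        rw [List.foldl_cons]
        by_cases hM : PySem.Str.startswith (PySem.Str.strip l) "```mermaid" = true
        · obtain ⟨hB, hF⟩ := mermaid_facts hM
          have hM2 := hM; simp at hM2
          have hstep : stepA (true, cb, res) l = (true, 0, res ++ [l]) := by
            simp [stepA, hM2]
          rw [hstep, hrest.2 0 (res ++ [l])]
          cases hdw : List.dropWhile (fun x => !(PySem.Str.strip x == "```")) rest with
          | nil =>
            simp [hdw, hF, keepA, hB]
          | cons f r =>
            simp [hdw, hF, keepA, hB]
        · have hM2 : PySem.Str.startswith (PySem.Str.strip l) "```mermaid" = false :=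
            eq_false_of_ne_true hM
          simp at hM2
          by_cases hF : PySem.Str.strip l = "```"
          · have hstep : stepA (true, cb, res) l = (false, 0, popBlanks res ++ [l]) := by
              simp [stepA, hF]
              all_goals decide
            rw [hstep, hrest.1 0 (popBlanks res ++ [l])]
            simp [hF, keepA]
          · by_cases hB : PySem.Str.strip l = ""
            · have hstep : stepA (true, cb, res) l
                  = (true, cb + 1, if cb + 1 ≤ 2 then res ++ [l] else res) := by
                simp [stepA, hB]
                all_goals decide
              rw [hstep]
              by_cases hc : cb + 1 ≤ 2
              · rw [if_pos hc, hrest.2 (cb + 1) (res ++ [l])]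
                cases hdw : List.dropWhile (fun x => !(PySem.Str.strip x == "```")) rest with
                | nil => simp [hdw, keepA, hB, hc]
                | cons f r => simp [hdw, keepA, hB, hc]
              · rw [if_neg hc, hrest.2 (cb + 1) res]
                cases hdw : List.dropWhile (fun x => !(PySem.Str.strip x == "```")) rest with
                | nil => simp [hdw, keepA, hB, hc]
                | cons f r => simp [hdw, keepA, hB, hc]
            · have hstep : stepA (true, cb, res) l = (true, 0, res ++ [l]) := by
                simp [stepA, hM2, hF, hB]
              rw [hstep, hrest.2 0 (res ++ [l])]
              cases hdw : List.dropWhile (fun x => !(PySem.Str.strip x == "```")) rest with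
              | nil => simp [hdw, hF, keepA, hB]
              | cons f r => simp [hdw, hF, keepA, hB]

-- ===== VERDICT (by name: the statement is the Claim_ definition above) =====
theorem trim_mermaid_blocks_spec : Claim_equal_trim_mermaid_blocks := by
  unfold Claim_equal_trim_mermaid_blocks Spec_trim_mermaid_blocks
  intro content _
  unfold trim_mermaid_blocks trim_mermaid_blocks_alt
  rw [(mainLoop (PySem.Str.splitlines content).length _ le_rfl).1 0 []]
  simp
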